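-- pv_equiv track=rewrite | github.com/akashmrc98/problemSolving | minMax.py | Carrier
-- ===== SOURCE A (Python) =====
-- def Carrier(arr, skipValue):
--     carry = 0
--     for i in range(0, len(arr)):
--         if i == skipValue:
--             continue
--         else:
--             carry = carry + arr[i]
--     return carry
-- ===== SOURCE B (Python) =====
-- def Carrier(arr, skipValue):
--     total = sum(arr)
--     if 0 <= skipValue < len(arr):
--         total -= arr[skipValue]
--     return total
-- ===== Notes on version B (the rewrite author's own statement) =====
-- stated objective: simpler
-- what changed: Replaces the filtered index loop with an unconditional built-in sum plus a single subtraction of the skipped element when the skip index is in range.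
import Mathlib
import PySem

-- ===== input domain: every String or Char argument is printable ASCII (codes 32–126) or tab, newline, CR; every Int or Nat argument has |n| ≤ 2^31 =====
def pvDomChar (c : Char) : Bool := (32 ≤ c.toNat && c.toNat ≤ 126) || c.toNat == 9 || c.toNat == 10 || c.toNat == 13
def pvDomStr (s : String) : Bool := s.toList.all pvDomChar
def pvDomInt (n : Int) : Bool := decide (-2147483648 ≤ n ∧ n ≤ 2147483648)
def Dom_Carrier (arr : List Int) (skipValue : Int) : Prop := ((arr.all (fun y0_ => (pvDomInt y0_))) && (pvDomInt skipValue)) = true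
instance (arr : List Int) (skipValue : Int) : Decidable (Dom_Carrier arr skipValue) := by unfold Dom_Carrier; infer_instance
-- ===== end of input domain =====

-- B sums the whole list once and subtracts the skipped element only when the index is in range; simpler than A's filtered index loop.

-- ===== PORT A =====
def Carrier (arr : List Int) (skipValue : Int) : Int :=
  (PySem.List.pyRange 0 (arr.length : Int) 1).foldl
    (fun carry i => if i = skipValue then carry else carry + PySem.List.pyGetD arr i 0) 0

-- ===== PORT B =====
def Carrier_alt (arr : List Int) (skipValue : Int) : Int :=
  let total := arr.sum
  if 0 ≤ skipValue ∧ skipValue < (arr.length : Int) then total - PySem.List.pyGetD arr skipValue 0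
  else total

-- ===== PRECONDITION & SPEC =====
def Spec_Carrier (arr : List Int) (skipValue : Int) (out : Int) : Prop := out = Carrier_alt arr skipValue
instance (arr : List Int) (skipValue : Int) (out : Int) : Decidable (Spec_Carrier arr skipValue out) := by unfold Spec_Carrier; infer_instance

-- ===== CLAIM (what is proved, stated in full; the proofs are below) =====
def Claim_equal_Carrier : Prop := ∀ (arr : List Int) (skipValue : Int), Dom_Carrier arr skipValue → Spec_Carrier arr skipValue (Carrier arr skipValue)

-- ===== LEMMAS AND PROOFS =====

lemma carrier_key (arr : List Int) (s : Int) :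
    Carrier arr s = Carrier_alt arr s := by
  induction arr using List.reverseRecOn with
  | nil =>
      simp [Carrier, Carrier_alt, PySem.List.pyRange_one_eq_nil]
  | append_singleton xs x ih =>
      have hlen : ((xs ++ [x]).length : Int) = (xs.length : Int) + 1 := by
        simp
      have hsplit :
          PySem.List.pyRange 0 ((xs ++ [x]).length : Int) 1
            = PySem.List.pyRange 0 (xs.length : Int) 1 ++ [(xs.length : Int)] := by
        rw [hlen, PySem.List.pyRange_one_succ_right (by positivity)]
      have hcongr :
          (PySem.List.pyRange 0 (xs.length : Int) 1).foldl
            (fun carry i => if i = s then carry else carry + PySem.List.pyGetD (xs ++ [x]) i 0) 0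
          = (PySem.List.pyRange 0 (xs.length : Int) 1).foldl
            (fun carry i => if i = s then carry else carry + PySem.List.pyGetD xs i 0) 0 := by
        apply PySem.List.foldl_congr_mem
        intro acc i hi
        rw [PySem.List.mem_pyRange_one] at hi
        have h0 : 0 ≤ i := hi.1
        have hlt : i.toNat < xs.length := by omega
        have : PySem.List.pyGetD (xs ++ [x]) i 0 = PySem.List.pyGetD xs i 0 := by
          rw [PySem.List.pyGetD_eq_getElem _ 0 h0 (by simp; omega),
              PySem.List.pyGetD_eq_getElem _ 0 h0 (by omega)]
          exact List.getElem_append_left hlt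
        rw [this]
      have hgetlast : PySem.List.pyGetD (xs ++ [x]) (xs.length : Int) 0 = x := by
        rw [PySem.List.pyGetD_eq_getElem _ 0 (by positivity) (by simp)]
        simp
      unfold Carrier at ih ⊢
      rw [hsplit, List.foldl_append]
      simp only [List.foldl_cons, List.foldl_nil]
      rw [hcongr, ih]
      by_cases heq : (xs.length : Int) = s
      · rw [if_pos heq]
        subst heq
        simp only [Carrier_alt, List.length_append, List.length_cons, List.length_nil]
        rw [if_neg (by omega), if_pos (by push_cast; omega), hgetlast]
        simp [List.sum_append]
      · rw [if_neg heq]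
        by_cases hin : 0 ≤ s ∧ s < (xs.length : Int)
        · have hg : PySem.List.pyGetD (xs ++ [x]) s 0 = PySem.List.pyGetD xs s 0 := by
            have hlt : s.toNat < xs.length := by omega
            rw [PySem.List.pyGetD_eq_getElem _ 0 hin.1 (by simp; omega),
                PySem.List.pyGetD_eq_getElem _ 0 hin.1 (by omega)]
            exact List.getElem_append_left hlt
          simp only [Carrier_alt, List.length_append, List.length_cons, List.length_nil]
          rw [if_pos hin, if_pos (by push_cast; omega), hg]
          simp [List.sum_append]
          ring
        · simp only [Carrier_alt, List.length_append, List.length_cons, List.length_nil]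
          rw [if_neg hin, if_neg (by push_cast at hin ⊢; omega)]
          simp [List.sum_append]

-- ===== VERDICT (by name: the statement is the Claim_ definition above) =====
theorem Carrier_spec : Claim_equal_Carrier := by
  intro arr s _
  unfold Spec_Carrier
  exact carrier_key arr s
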